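-- pv_equiv track=rewrite | github.com/Shiroizu/VDBpy | vdbpy/api/entries.py | parse_names
-- ===== SOURCE A (Python) =====
-- def parse_names(data: dict) -> tuple[str, str, str, list[str]]:
--     name_non_english = ""
--     name_romaji = ""
--     name_english = ""
--     aliases: list[str] = []
--
--     if "names" in data:
--         for entry in data["names"]:
--             language = entry["language"]
--             value = entry["value"]
--             match language:
--                 case "Japanese":
--                     name_non_english = value
--                 case "Romaji":
--                     name_romaji = value
--                 case "English":
--                     name_english = value
--                 case "Unspecified":
--                     aliases.append(value)
--
--     return name_non_english, name_romaji, name_english, aliases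
-- ===== SOURCE B (Python) =====
-- def parse_names(data: dict) -> tuple[str, str, str, list[str]]:
--     names = data.get("names", [])
--
--     def last_value(language: str) -> str:
--         for entry in reversed(names):
--             if entry["language"] == language:
--                 return entry["value"]
--         return ""
--
--     aliases = [entry["value"] for entry in names if entry["language"] == "Unspecified"]
--     return (last_value("Japanese"), last_value("Romaji"),
--             last_value("English"), aliases)
-- ===== Notes on version B (the rewrite author's own statement) =====
-- stated objective: alternative
-- what changed: Replaces the single accumulating pass with four staged scans: one reversed early-exit search per language (last assignment wins by construction, no accumulator) plus a filter comprehension for the aliases.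
import Mathlib
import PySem

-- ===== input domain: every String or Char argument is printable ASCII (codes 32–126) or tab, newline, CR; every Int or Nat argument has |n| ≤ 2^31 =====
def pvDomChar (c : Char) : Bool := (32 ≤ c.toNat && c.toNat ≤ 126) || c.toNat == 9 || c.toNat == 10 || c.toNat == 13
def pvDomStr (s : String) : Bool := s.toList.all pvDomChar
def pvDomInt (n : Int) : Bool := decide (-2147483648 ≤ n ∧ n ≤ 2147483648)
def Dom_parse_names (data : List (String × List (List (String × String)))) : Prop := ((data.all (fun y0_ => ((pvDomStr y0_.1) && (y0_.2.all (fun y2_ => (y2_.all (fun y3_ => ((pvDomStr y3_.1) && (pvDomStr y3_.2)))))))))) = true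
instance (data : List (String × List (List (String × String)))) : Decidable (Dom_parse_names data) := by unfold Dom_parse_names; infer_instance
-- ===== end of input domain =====

-- B replaces A's single accumulating pass by four staged scans (a reversed early-exit
-- search per language plus a filter comprehension for aliases); return value only.

-- ===== PORT A =====
-- loop body of A's for-loop (the four-case match); Pre_ excludes entries missing a key (Python raises KeyError)
def pnStepA (st : String × String × String × List String) (entry : List (String × String)) :
    String × String × String × List String :=
  let e := PySem.Dict.mk entry
  let language := e.getD "language" ""
  let value := e.getD "value" ""
  if language == "Japanese" then (value, st.2.1, st.2.2.1, st.2.2.2)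
  else if language == "Romaji" then (st.1, value, st.2.2.1, st.2.2.2)
  else if language == "English" then (st.1, st.2.1, value, st.2.2.2)
  else if language == "Unspecified" then (st.1, st.2.1, st.2.2.1, st.2.2.2 ++ [value])
  else st

def parse_names (data : List (String × List (List (String × String)))) : String × String × String × List String :=
  let d := PySem.Dict.mk data
  let st0 : String × String × String × List String := ("", "", "", [])
  if d.contains "names" then (d.getD "names" []).foldl pnStepA st0
  else st0

-- ===== PORT B =====
-- B's inner helper: 'for entry in reversed(names): if match: return value; return ""'
def pnLastValue (language : String) : List (List (String × String)) → String
  | [] => ""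
  | entry :: rest =>
      let e := PySem.Dict.mk entry
      if e.getD "language" "" == language then e.getD "value" ""
      else pnLastValue language rest

def parse_names_alt (data : List (String × List (List (String × String)))) : String × String × String × List String :=
  let names := (PySem.Dict.mk data).getD "names" []
  let aliases :=
    (names.filter (fun entry => (PySem.Dict.mk entry).getD "language" "" == "Unspecified")).map
      (fun entry => (PySem.Dict.mk entry).getD "value" "")
  (pnLastValue "Japanese" names.reverse, pnLastValue "Romaji" names.reverse,
   pnLastValue "English" names.reverse, aliases)

-- ===== PRECONDITION & SPEC =====
-- Pre_ excludes exactly the inputs on which Python A (and Python B) raises KeyError: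
-- an entry of the "names" list missing the "language" or "value" key.
def Pre_parse_names (data : List (String × List (List (String × String)))) : Prop :=
  (((PySem.Dict.mk data).getD "names" []).all
    (fun e => (PySem.Dict.mk e).contains "language" && (PySem.Dict.mk e).contains "value")) = true
instance (data : List (String × List (List (String × String)))) : Decidable (Pre_parse_names data) := by unfold Pre_parse_names; infer_instance
def pvWitness_parse_names : (List (String × List (List (String × String)))) :=
  [("names", [[("language", "Japanese"), ("value", "j")], [("language", "Unspecified"), ("value", "x")]])]
def Spec_parse_names (data : List (String × List (List (String × String)))) (out : String × String × String × List String) : Prop := out = parse_names_alt data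
instance (data : List (String × List (List (String × String)))) (out : String × String × String × List String) : Decidable (Spec_parse_names data out) := by unfold Spec_parse_names; infer_instance

-- ===== CLAIM (what is proved, stated in full; the proofs are below) =====
def Claim_equal_parse_names : Prop := ∀ (data : List (String × List (List (String × String)))), Dom_parse_names data → Pre_parse_names data → Spec_parse_names data (parse_names data)

-- ===== LEMMAS AND PROOFS =====

-- pnLastValue generalised with an explicit default at the end of the scan
def pnLastD (language d : String) : List (List (String × String)) → String
  | [] => d
  | entry :: rest =>
      let e := PySem.Dict.mk entry
      if e.getD "language" "" == language then e.getD "value" ""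
      else pnLastD language d rest

theorem pnLastD_empty (language : String) (l : List (List (String × String))) :
    pnLastD language "" l = pnLastValue language l := by
  induction l with
  | nil => rfl
  | cons e rest ih => simp only [pnLastD, pnLastValue, ih]

-- appending one entry at the end of the scanned list only changes the default
theorem pnLastD_snoc (language d : String) (entry : List (String × String))
    (l : List (List (String × String))) :
    pnLastD language d (l ++ [entry]) =
      pnLastD language
        (if (PySem.Dict.mk entry).getD "language" "" == language
         then (PySem.Dict.mk entry).getD "value" "" else d) l := by
  induction l with
  | nil => simp only [List.nil_append, pnLastD]
  | cons x rest ih => simp only [List.cons_append, pnLastD, ih]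

def pnAliases (names : List (List (String × String))) : List String :=
  (names.filter (fun entry => (PySem.Dict.mk entry).getD "language" "" == "Unspecified")).map
    (fun entry => (PySem.Dict.mk entry).getD "value" "")

-- A's whole fold, characterised as three last-wins scans plus the alias list
theorem pnFoldA (names : List (List (String × String))) (j r e : String) (al : List String) :
    names.foldl pnStepA (j, r, e, al) =
      (pnLastD "Japanese" j names.reverse, pnLastD "Romaji" r names.reverse,
       pnLastD "English" e names.reverse, al ++ pnAliases names) := by
  induction names generalizing j r e al with
  | nil => simp [pnLastD, pnAliases]
  | cons n rest ih =>
    simp only [List.foldl_cons, List.reverse_cons, pnLastD_snoc, pnAliases, List.filter_cons]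
    by_cases hJ : (PySem.Dict.mk n).getD "language" "" = "Japanese"
    · simp [pnStepA, hJ, ih, pnAliases]
    · by_cases hR : (PySem.Dict.mk n).getD "language" "" = "Romaji"
      · simp [pnStepA, hR, ih, pnAliases]
      · by_cases hE : (PySem.Dict.mk n).getD "language" "" = "English"
        · simp [pnStepA, hE, ih, pnAliases]
        · by_cases hU : (PySem.Dict.mk n).getD "language" "" = "Unspecified"
          · simp [pnStepA, hU, ih, pnAliases]
          · simp [pnStepA, hJ, hR, hE, hU, ih, pnAliases]

-- ===== VERDICT (by name: the statement is the Claim_ definition above) =====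
theorem parse_names_spec : Claim_equal_parse_names := by
  intro data _ _
  unfold Spec_parse_names parse_names parse_names_alt
  by_cases h : (PySem.Dict.mk data).contains "names"
  · simp only [if_pos h, pnFoldA, pnLastD_empty, List.nil_append]
    rfl
  · simp only [if_neg h]
    have hc : (PySem.Dict.mk data : PySem.Dict String (List (List (String × String)))).contains "names" = false :=
      Bool.eq_false_iff.mpr h
    rw [PySem.Dict.getD_of_not_contains _ _ hc]
    rfl
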